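-- pv_equiv track=rewrite | github.com/JorgeRR89/portfolio-jrr | pages/4_Lab.py | find_project
-- ===== SOURCE A (Python) =====
-- def slugify(s: str) -> str:
--     s = (s or "").strip().lower()
--     keep = []
--     for ch in s:
--         keep.append(ch if ch.isalnum() else "-")
--     out = "".join(keep)
--     while "--" in out:
--         out = out.replace("--", "-")
--     return out.strip("-")
--
-- def find_project(projects: list[dict], q: str | None) -> dict | None:
--     if not q:
--         return None
--     q = str(q).strip().lower()
--
--     # 1) match direct id
--     for p in projects:
--         if str(p.get("id", "")).strip().lower() == q and p.get("id"):
--             return p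
--
--     # 2) match slug(title)
--     for p in projects:
--         if slugify(p.get("title", "")) == q:
--             return p
--
--     # 3) contains match title (fallback)
--     for p in projects:
--         if q and q in str(p.get("title", "")).lower():
--             return p
--
--     return None
-- ===== SOURCE B (Python) =====
-- def slugify(s: str) -> str:
--     s = (s or "").strip().lower()
--     keep = []
--     for ch in s:
--         keep.append(ch if ch.isalnum() else "-")
--     out = "".join(keep)
--     while "--" in out:
--         out = out.replace("--", "-")
--     return out.strip("-")
--
-- def find_project(projects, q):
--     if not q:
--         return None
--     qn = str(q).strip().lower()
--
--     def rank(p):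
--         if str(p.get("id", "")).strip().lower() == qn and p.get("id"):
--             return 0
--         if slugify(p.get("title", "")) == qn:
--             return 1
--         if qn and qn in str(p.get("title", "")).lower():
--             return 2
--         return 3
--
--     best, best_r = None, 3
--     for p in projects:
--         r = rank(p)
--         if r < best_r:
--             best, best_r = p, r
--             if r == 0:
--                 break
--     return best
-- ===== Notes on version B (the rewrite author's own statement) =====
-- stated objective: alternative
-- what changed: Replaced A's three sequential scans (id, then slug, then substring) by computing a numeric tier rank (0/1/2/3) per project and one minimum-rank scan with early exit at rank 0, keeping first-in-list selection within each tier.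
import Mathlib
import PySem

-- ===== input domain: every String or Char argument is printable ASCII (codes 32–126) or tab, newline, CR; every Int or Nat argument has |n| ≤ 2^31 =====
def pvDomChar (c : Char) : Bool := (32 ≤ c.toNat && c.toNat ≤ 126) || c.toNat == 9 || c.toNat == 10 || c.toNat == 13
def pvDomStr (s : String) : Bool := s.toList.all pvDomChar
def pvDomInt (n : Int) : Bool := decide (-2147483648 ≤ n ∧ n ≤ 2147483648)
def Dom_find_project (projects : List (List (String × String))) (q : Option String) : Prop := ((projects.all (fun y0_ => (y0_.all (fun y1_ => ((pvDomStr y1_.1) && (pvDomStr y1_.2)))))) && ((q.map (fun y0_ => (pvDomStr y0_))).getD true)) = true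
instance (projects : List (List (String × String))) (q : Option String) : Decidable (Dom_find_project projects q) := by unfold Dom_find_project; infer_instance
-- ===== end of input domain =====

-- B replaces A's three sequential first-match scans by a per-project tier rank
-- (0 = id, 1 = slug, 2 = substring, 3 = none) and a single minimum-rank scan with
-- early exit at rank 0; same result and cost class (objective: alternative).
-- slugify is the shared helper both sources contain verbatim.

-- ===== PORT A =====
-- the 'while "--" in out' loop of slugify, with a fuel guard (each replacement
-- strictly shortens the string, so its length bounds the iteration count)
def pvCollapse (fuel : Nat) (out : List Char) : List Char :=
  match fuel with
  | 0 => out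
  | fuel + 1 =>
    if PySem.Chars.isIn ['-', '-'] out then
      pvCollapse fuel (PySem.Chars.replace out ['-', '-'] ['-'])
    else out

-- shared helper slugify (identical source in Source A and Source B)
def slugify (s : String) : String :=
  let s1 := PySem.Chars.lower (PySem.Chars.strip s.toList)
  let keep := s1.map (fun ch => if PySem.Chars.isalnum ch then ch else '-')
  String.ofList (PySem.Chars.stripChars (pvCollapse keep.length keep) ['-'])

-- p.get(k, "") on the string-valued dict
def pvGetS (p : List (String × String)) (k : String) : String :=
  PySem.Dict.getD (PySem.Dict.mk p) k ""

-- A, loop 1: 'for p in projects: if str(p.get("id","")).strip().lower()==q and p.get("id"): return p'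
def pvLoopId (qn : String) : List (List (String × String)) → Option (List (String × String))
  | [] => none
  | p :: rest =>
    if (PySem.Str.lower (PySem.Str.strip (pvGetS p "id")) == qn)
        && (match PySem.Dict.get? (PySem.Dict.mk p) "id" with
            | none => false
            | some v => v != "") then some p
    else pvLoopId qn rest

-- A, loop 2: first p with slugify(p.get("title","")) == q
def pvLoopSlug (qn : String) : List (List (String × String)) → Option (List (String × String))
  | [] => none
  | p :: rest =>
    if slugify (pvGetS p "title") == qn then some p
    else pvLoopSlug qn rest

-- A, loop 3: first p with q truthy and q in p.get("title","").lower()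
def pvLoopSub (qn : String) : List (List (String × String)) → Option (List (String × String))
  | [] => none
  | p :: rest =>
    if (qn != "") && PySem.Str.isIn qn (PySem.Str.lower (pvGetS p "title")) then some p
    else pvLoopSub qn rest

def find_project (projects : List (List (String × String))) (q : Option String) : Option (List (String × String)) :=
  match q with
  | none => none
  | some s =>
    if s == "" then none
    else
      let qn := PySem.Str.lower (PySem.Str.strip s)
      match pvLoopId qn projects with
      | some p => some p
      | none =>
        match pvLoopSlug qn projects with
        | some p => some p
        | none => pvLoopSub qn projects

-- ===== PORT B =====
-- Source B's rank(p): which tier (0 id / 1 slug / 2 substring / 3 none) p belongs to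
def pvRank (qn : String) (p : List (String × String)) : Nat :=
  if (PySem.Str.lower (PySem.Str.strip (pvGetS p "id")) == qn)
      && (match PySem.Dict.get? (PySem.Dict.mk p) "id" with
          | none => false
          | some v => v != "") then 0
  else if slugify (pvGetS p "title") == qn then 1
  else if (qn != "") && PySem.Str.isIn qn (PySem.Str.lower (pvGetS p "title")) then 2
  else 3

-- Source B's loop: keep (best, best_r), update on strict improvement, break at rank 0
def pvScan (qn : String) : List (List (String × String)) → Option (List (String × String)) → Nat → Option (List (String × String))
  | [], best, _ => best
  | p :: rest, best, br =>
    let r := pvRank qn p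
    if r < br then
      if r == 0 then some p else pvScan qn rest (some p) r
    else pvScan qn rest best br

def find_project_alt (projects : List (List (String × String))) (q : Option String) : Option (List (String × String)) :=
  match q with
  | none => none
  | some s =>
    if s == "" then none
    else pvScan (PySem.Str.lower (PySem.Str.strip s)) projects none 3

-- ===== PRECONDITION & SPEC =====
def Spec_find_project (projects : List (List (String × String))) (q : Option String) (out : Option (List (String × String))) : Prop := out = find_project_alt projects q
instance (projects : List (List (String × String))) (q : Option String) (out : Option (List (String × String))) : Decidable (Spec_find_project projects q out) := by unfold Spec_find_project; infer_instance

-- ===== CLAIM (what is proved, stated in full; the proofs are below) =====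
def Claim_equal_find_project : Prop := ∀ (projects : List (List (String × String))) (q : Option String), Dom_find_project projects q → Spec_find_project projects q (find_project projects q)

-- ===== LEMMAS AND PROOFS =====
-- A's three loop conditions, named for the proofs
def pvC0 (qn : String) (p : List (String × String)) : Bool :=
  (PySem.Str.lower (PySem.Str.strip (pvGetS p "id")) == qn)
    && (match PySem.Dict.get? (PySem.Dict.mk p) "id" with
        | none => false
        | some v => v != "")

def pvC1 (qn : String) (p : List (String × String)) : Bool :=
  slugify (pvGetS p "title") == qn

def pvC2 (qn : String) (p : List (String × String)) : Bool :=
  (qn != "") && PySem.Str.isIn qn (PySem.Str.lower (pvGetS p "title"))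

theorem pvRank_eq (qn : String) (p : List (String × String)) :
    pvRank qn p = if pvC0 qn p then 0 else if pvC1 qn p then 1 else if pvC2 qn p then 2 else 3 := rfl

theorem pvLoopId_eq (qn : String) (l : List (List (String × String))) :
    pvLoopId qn l = l.find? (pvC0 qn) := by
  induction l with
  | nil => rfl
  | cons p rest ih =>
    have e : pvLoopId qn (p :: rest) = if pvC0 qn p then some p else pvLoopId qn rest := rfl
    cases h : pvC0 qn p <;> simp [e, h, ih]

theorem pvLoopSlug_eq (qn : String) (l : List (List (String × String))) :
    pvLoopSlug qn l = l.find? (pvC1 qn) := by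
  induction l with
  | nil => rfl
  | cons p rest ih =>
    have e : pvLoopSlug qn (p :: rest) = if pvC1 qn p then some p else pvLoopSlug qn rest := rfl
    cases h : pvC1 qn p <;> simp [e, h, ih]

theorem pvLoopSub_eq (qn : String) (l : List (List (String × String))) :
    pvLoopSub qn l = l.find? (pvC2 qn) := by
  induction l with
  | nil => rfl
  | cons p rest ih =>
    have e : pvLoopSub qn (p :: rest) = if pvC2 qn p then some p else pvLoopSub qn rest := rfl
    cases h : pvC2 qn p <;> simp [e, h, ih]

-- pointwise characterisation of the rank tiers
theorem pvRank_zero (qn : String) (p : List (String × String)) :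
    (pvRank qn p == 0) = pvC0 qn p := by
  rw [pvRank_eq]
  cases h0 : pvC0 qn p <;> cases h1 : pvC1 qn p <;> cases h2 : pvC2 qn p <;> simp

theorem pvRank_one (qn : String) (p : List (String × String)) (h : pvC0 qn p = false) :
    (pvRank qn p == 1) = pvC1 qn p := by
  rw [pvRank_eq, h]
  cases h1 : pvC1 qn p <;> cases h2 : pvC2 qn p <;> simp

theorem pvRank_two (qn : String) (p : List (String × String))
    (h0 : pvC0 qn p = false) (h1 : pvC1 qn p = false) :
    (pvRank qn p == 2) = pvC2 qn p := by
  rw [pvRank_eq, h0, h1]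
  cases h2 : pvC2 qn p <;> simp

theorem find?_congr' {α : Type} (p q : α → Bool) (l : List α)
    (h : ∀ a ∈ l, p a = q a) : l.find? p = l.find? q := by
  induction l with
  | nil => rfl
  | cons a rest ih =>
    simp only [List.find?_cons, h a (by simp)]
    split <;> [rfl; exact ih (fun a ha => h a (by simp [ha]))]

-- the one-pass minimum-rank scan equals the or-chain of the three rank find?s
theorem pvScan_inv (qn : String) (l : List (List (String × String))) :
    pvScan qn l none 3 =
      ((l.find? (fun p => pvRank qn p == 0)).or
        ((l.find? (fun p => pvRank qn p == 1)).or (l.find? (fun p => pvRank qn p == 2))))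
    ∧ (∀ b, pvScan qn l (some b) 2 =
        ((l.find? (fun p => pvRank qn p == 0)).or
          ((l.find? (fun p => pvRank qn p == 1)).or (some b))))
    ∧ (∀ b, pvScan qn l (some b) 1 =
        ((l.find? (fun p => pvRank qn p == 0)).or (some b))) := by
  induction l with
  | nil => simp [pvScan]
  | cons p rest ih =>
    obtain ⟨ih3, ih2, ih1⟩ := ih
    have h4 : pvRank qn p = 0 ∨ pvRank qn p = 1 ∨ pvRank qn p = 2 ∨ pvRank qn p = 3 := by
      rw [pvRank_eq]; split_ifs <;> simp
    rcases h4 with h | h | h | h <;>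
      refine ⟨?_, fun b => ?_, fun b => ?_⟩ <;>
        simp [pvScan, h, ih3, ih2, ih1]

-- the or-chain over rank tiers equals A's or-chain over the raw conditions
theorem chain_eq (qn : String) (l : List (List (String × String))) :
    ((l.find? (fun p => pvRank qn p == 0)).or
      ((l.find? (fun p => pvRank qn p == 1)).or (l.find? (fun p => pvRank qn p == 2)))) =
    ((l.find? (pvC0 qn)).or ((l.find? (pvC1 qn)).or (l.find? (pvC2 qn)))) := by
  have e0 : l.find? (fun p => pvRank qn p == 0) = l.find? (pvC0 qn) :=
    find?_congr' _ _ _ (fun a _ => pvRank_zero qn a)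
  rw [e0]
  cases h0 : l.find? (pvC0 qn) with
  | some p => simp
  | none =>
    have hm0 : ∀ a ∈ l, pvC0 qn a = false := by
      intro a ha
      have := List.find?_eq_none.mp h0 a ha
      simpa using this
    have e1 : l.find? (fun p => pvRank qn p == 1) = l.find? (pvC1 qn) :=
      find?_congr' _ _ _ (fun a ha => pvRank_one qn a (hm0 a ha))
    rw [e1]
    cases h1 : l.find? (pvC1 qn) with
    | some p => simp
    | none =>
      have hm1 : ∀ a ∈ l, pvC1 qn a = false := by
        intro a ha
        have := List.find?_eq_none.mp h1 a ha
        simpa using this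
      have e2 : l.find? (fun p => pvRank qn p == 2) = l.find? (pvC2 qn) :=
        find?_congr' _ _ _ (fun a ha => pvRank_two qn a (hm0 a ha) (hm1 a ha))
      rw [e2]

-- ===== VERDICT (by name: the statement is the Claim_ definition above) =====
theorem find_project_spec : Claim_equal_find_project := by
  intro projects q _
  unfold Spec_find_project find_project find_project_alt
  cases q with
  | none => rfl
  | some s =>
    by_cases hs : s == ""
    · simp [hs]
    · simp only [hs, if_false, Bool.false_eq_true]
      rw [(pvScan_inv _ projects).1, chain_eq,
        pvLoopId_eq, pvLoopSlug_eq, pvLoopSub_eq]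
      cases projects.find? (pvC0 (PySem.Str.lower (PySem.Str.strip s))) <;>
        cases projects.find? (pvC1 (PySem.Str.lower (PySem.Str.strip s))) <;>
          simp [Option.or]
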